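-- pv_equiv track=rewrite | github.com/CoAuToSe/dev | rfjohugli.py | hac_val
-- ===== SOURCE A (Python) =====
-- def hac_val(grillage):
--     num=[0]*len(grillage)
--     for E,e in enumerate(grillage):
--         for F,f in enumerate(e):
--             if f == "0":
--                 num[E] += 1*(3**F)
--             elif f == "1":
--                 num[E] += 2*(3**F)
--     return num
-- ===== SOURCE B (Python) =====
-- def hac_val(grillage):
--     res = []
--     for e in grillage:
--         acc = 0
--         for f in reversed(e):
--             acc = acc * 3 + (1 if f == "0" else 2 if f == "1" else 0)
--         res.append(acc)
--     return res
-- ===== Notes on version B (the rewrite author's own statement) =====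
-- stated objective: idiomatic
-- what changed: Each row is encoded with Horner's rule over the reversed row (acc = acc*3 + digit), appending per-row results, instead of preallocating a zero array and summing explicit 3**F powers per character.
import Mathlib
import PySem

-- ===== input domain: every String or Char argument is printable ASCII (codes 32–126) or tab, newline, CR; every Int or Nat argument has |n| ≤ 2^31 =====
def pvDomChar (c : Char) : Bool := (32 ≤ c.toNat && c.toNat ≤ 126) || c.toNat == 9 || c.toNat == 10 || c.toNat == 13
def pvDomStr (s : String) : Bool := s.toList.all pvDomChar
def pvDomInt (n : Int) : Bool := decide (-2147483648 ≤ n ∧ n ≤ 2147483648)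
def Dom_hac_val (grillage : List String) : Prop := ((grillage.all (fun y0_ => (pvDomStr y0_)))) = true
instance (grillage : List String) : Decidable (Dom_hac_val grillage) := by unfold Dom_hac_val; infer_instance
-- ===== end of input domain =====

-- B re-implements each row's encoding with Horner's rule over the reversed row, appending
-- per-row results, instead of preallocating a zero array and summing explicit 3^F powers.


-- ===== PORT A =====
-- inner loop: for F,f in enumerate(e): conditional in-place update of num[E]
def hac_innerA (E : Nat) (cs : List Char) (F : Nat) (num : List Int) : List Int :=
  match cs with
  | [] => num
  | f :: rest =>
    let num' :=
      if f = '0' then num.set E (num.getD E 0 + 1 * 3 ^ F)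
      else if f = '1' then num.set E (num.getD E 0 + 2 * 3 ^ F)
      else num
    hac_innerA E rest (F + 1) num'

-- outer loop: for E,e in enumerate(grillage)
def hac_outerA (rows : List String) (E : Nat) (num : List Int) : List Int :=
  match rows with
  | [] => num
  | e :: rest => hac_outerA rest (E + 1) (hac_innerA E e.toList 0 num)

def hac_val (grillage : List String) : List Int :=
  hac_outerA grillage 0 (List.replicate grillage.length 0)

-- ===== PORT B =====
-- Horner accumulator over one (already reversed) row
def hac_rowB (cs : List Char) (acc : Int) : Int :=
  match cs with
  | [] => acc
  | f :: rest => hac_rowB rest (acc * 3 + (if f = '0' then 1 else if f = '1' then 2 else 0))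

def hac_val_alt (grillage : List String) : List Int :=
  grillage.map (fun e => hac_rowB e.toList.reverse 0)

-- ===== PRECONDITION & SPEC =====
def Spec_hac_val (grillage : List String) (out : List Int) : Prop := out = hac_val_alt grillage
instance (grillage : List String) (out : List Int) : Decidable (Spec_hac_val grillage out) := by unfold Spec_hac_val; infer_instance

-- ===== CLAIM (what is proved, stated in full; the proofs are below) =====
def Claim_equal_hac_val : Prop := ∀ (grillage : List String), Dom_hac_val grillage → Spec_hac_val grillage (hac_val grillage)

-- ===== LEMMAS AND PROOFS =====

def pvDig (f : Char) : Int := if f = '0' then 1 else if f = '1' then 2 else 0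

def pvVal : List Char → Int
  | [] => 0
  | f :: rest => pvDig f + 3 * pvVal rest

theorem hac_rowB_append (l₁ l₂ : List Char) (acc : Int) :
    hac_rowB (l₁ ++ l₂) acc = hac_rowB l₂ (hac_rowB l₁ acc) := by
  induction l₁ generalizing acc with
  | nil => simp [hac_rowB]
  | cons a l ih => simp [hac_rowB, ih]

theorem hac_rowB_reverse (cs : List Char) : hac_rowB cs.reverse 0 = pvVal cs := by
  induction cs with
  | nil => simp [hac_rowB, pvVal]
  | cons f rest ih =>
    simp only [List.reverse_cons, hac_rowB_append, ih, hac_rowB, pvVal, pvDig]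
    ring

theorem pv_take_set (l : List Int) (E : Nat) (v : Int) (h : E < l.length) :
    (l.set E v).take (E + 1) = l.take E ++ [v] := by
  induction l generalizing E with
  | nil => simp at h
  | cons a l ih =>
    cases E with
    | zero => simp
    | succ E =>
      simp only [List.set_cons_succ, List.take_succ_cons]
      rw [ih E (by simpa using h)]
      simp

theorem pv_drop_succ_set (l : List Int) (E : Nat) (v : Int) :
    (l.set E v).drop (E + 1) = l.drop (E + 1) := by
  induction l generalizing E with
  | nil => simp
  | cons a l ih =>
    cases E with
    | zero => simp
    | succ E => simpa using ih E

theorem hac_innerA_eq (E : Nat) (cs : List Char) :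
    ∀ (F : Nat) (num : List Int), E < num.length →
      hac_innerA E cs F num = num.set E (num.getD E 0 + 3 ^ F * pvVal cs) := by
  induction cs with
  | nil =>
    intro F num hE
    simp only [hac_innerA, pvVal, mul_zero, add_zero]
    rw [List.getD_eq_getElem?_getD, List.getElem?_eq_getElem hE]
    simp
  | cons f rest ih =>
    intro F num hE
    simp only [hac_innerA]
    by_cases h0 : f = '0'
    · simp only [if_pos h0]
      rw [ih (F + 1) _ (by simpa using hE)]
      have hg : (num.set E (num.getD E 0 + 1 * 3 ^ F)).getD E 0
          = num.getD E 0 + 1 * 3 ^ F := by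
        rw [List.getD_eq_getElem?_getD, List.getElem?_set_self hE]
        rfl
      rw [hg, List.set_set]
      simp only [pvVal, pvDig, if_pos h0]
      ring_nf
    · by_cases h1 : f = '1'
      · simp only [if_neg h0, if_pos h1]
        rw [ih (F + 1) _ (by simpa using hE)]
        have hg : (num.set E (num.getD E 0 + 2 * 3 ^ F)).getD E 0
            = num.getD E 0 + 2 * 3 ^ F := by
          rw [List.getD_eq_getElem?_getD, List.getElem?_set_self hE]
          rfl
        rw [hg, List.set_set]
        simp only [pvVal, pvDig, if_neg h0, if_pos h1]
        ring_nf
      · simp only [if_neg h0, if_neg h1]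
        rw [ih (F + 1) _ hE]
        simp only [pvVal, pvDig, if_neg h0, if_neg h1]
        ring_nf

theorem hac_outerA_eq (rows : List String) :
    ∀ (E : Nat) (num : List Int),
      num.drop E = List.replicate (num.length - E) 0 →
      E + rows.length ≤ num.length →
      hac_outerA rows E num =
        num.take E ++ rows.map (fun e => pvVal e.toList)
          ++ List.replicate (num.length - E - rows.length) 0 := by
  induction rows with
  | nil =>
    intro E num hrep hlen
    simp only [hac_outerA, List.map_nil, List.length_nil, Nat.sub_zero]
    rw [← hrep]
    simp
  | cons e rest ih =>
    intro E num hrep hlen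
    simp only [List.length_cons] at hlen
    have hE : E < num.length := by omega
    have hget : num.getD E 0 = 0 := by
      have h0 : (num.drop E)[0]? = num[E]? := by
        rw [List.getElem?_drop]
        simp
      rw [hrep] at h0
      rw [List.getD_eq_getElem?_getD, ← h0]
      have : 0 < num.length - E := by omega
      simp [this]
    have hdrop : num.drop (E + 1) = List.replicate (num.length - (E + 1)) 0 := by
      have h1 := congrArg (fun l => List.drop 1 l) hrep
      simp only [List.drop_drop, List.drop_replicate] at h1
      have h2 : num.length - E - 1 = num.length - (E + 1) := by omega
      rw [h2] at h1
      exact h1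
    simp only [hac_outerA]
    rw [hac_innerA_eq E e.toList 0 num hE, hget, pow_zero, one_mul, zero_add]
    rw [ih (E + 1) (num.set E (pvVal e.toList))
        (by rw [pv_drop_succ_set, List.length_set]; exact hdrop)
        (by simp only [List.length_set]; omega)]
    rw [pv_take_set num E _ hE, List.length_set]
    simp only [List.map_cons, List.append_assoc, List.singleton_append,
      List.length_cons]
    have h3 : num.length - (E + 1) - rest.length = num.length - E - (rest.length + 1) := by
      omega
    rw [h3]

theorem hac_val_eq_map (grillage : List String) :
    hac_val grillage = grillage.map (fun e => pvVal e.toList) := by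
  unfold hac_val
  rw [hac_outerA_eq grillage 0 (List.replicate grillage.length 0)
      (by simp) (by simp)]
  simp

-- ===== VERDICT (by name: the statement is the Claim_ definition above) =====
theorem hac_val_spec : Claim_equal_hac_val := by
  intro grillage _
  unfold Spec_hac_val hac_val_alt
  rw [hac_val_eq_map]
  exact List.map_congr_left (fun e _ => (hac_rowB_reverse e.toList).symm)
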